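-- pv_equiv track=rewrite | github.com/palash-sarate/Motive_hackathon | download_web_content.py | process_web_content
-- ===== SOURCE A (Python) =====
-- def process_web_content(content):
--     """
--     Processes the web content and creates a structured dictionary per entry.
--     """
--
--     entries = []
--     entry = {}
--
--     for line in content.splitlines():
--         line = line.strip()
--         if not line or line.startswith("-----"):
--             continue
--
--         if line.startswith("TITLE:"):
--             if entry:
--                 entries.append(entry)
--             entry = {"title": line.replace("TITLE:", "").strip()}
--             capture_field = None
--
--         elif line.startswith("URL:"):
--             entry["url"] = line.replace("URL:", "").strip()
--             capture_field = None
--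
--         # elif line.startswith("METADATA:"):
--         #     entry["metadata"] = []
--         #     capture_field = None
--         # elif line.startswith("categories:"):
--         #     entry["categories"] = []
--         #     capture_field = None
--         # elif line.startswith("tags:"):
--         #     entry["tags"] = []
--         #     capture_field = None
--
--         elif line.startswith("EXCERPT:"):
--             entry["excerpt"] = ""
--             capture_field = "excerpt"
--
--         elif line.startswith("CONTENT:"):
--             entry["content"] = ""
--             capture_field = "content"
--
--         else:
--             if capture_field == "excerpt":
--                 entry["excerpt"] += (line + "\n")
--             elif capture_field == "content":
--                 entry["content"] += (line + "\n")
--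
--     # Add the last entry
--     if entry:
--         entries.append(entry)
--
--     return entries
-- ===== SOURCE B (Python) =====
-- def process_web_content(content):
--     # Two-pass decomposition: normalize/filter lines, partition into TITLE-led
--     # segments, then turn each segment into an entry dict independently.
--     lines = [s for s in (l.strip() for l in content.splitlines())
--              if s and not s.startswith("-----")]
--     if lines and not lines[0].startswith(("TITLE:", "URL:", "EXCERPT:", "CONTENT:")):
--         raise ValueError("unexpected content before the first TITLE:/URL:/EXCERPT:/CONTENT: marker")
--     segments = []
--     current = []
--     for s in lines:
--         if s.startswith("TITLE:"):
--             segments.append(current)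
--             current = [s]
--         else:
--             current.append(s)
--     segments.append(current)
--     entries = []
--     for seg in segments:
--         entry = {}
--         capture = None
--         for s in seg:
--             if s.startswith("TITLE:"):
--                 entry["title"] = s.replace("TITLE:", "").strip()
--                 capture = None
--             elif s.startswith("URL:"):
--                 entry["url"] = s.replace("URL:", "").strip()
--                 capture = None
--             elif s.startswith("EXCERPT:"):
--                 entry["excerpt"] = ""
--                 capture = "excerpt"
--             elif s.startswith("CONTENT:"):
--                 entry["content"] = ""
--                 capture = "content"
--             elif capture == "excerpt":
--                 entry["excerpt"] += s + "\n"
--             elif capture == "content":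
--                 entry["content"] += s + "\n"
--         if entry:
--             entries.append(entry)
--     return entries
-- ===== Notes on version B (the rewrite author's own statement) =====
-- stated objective: alternative
-- what changed: Replaces A's single-pass state machine (one mutable entry/capture threaded through all lines) by a three-stage pipeline: normalize-and-filter the lines, partition them into TITLE-led segments, then convert each segment independently into an entry dict (with an explicit ValueError on input whose first kept line is no marker, where A dies on an unbound local).
import Mathlib
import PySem

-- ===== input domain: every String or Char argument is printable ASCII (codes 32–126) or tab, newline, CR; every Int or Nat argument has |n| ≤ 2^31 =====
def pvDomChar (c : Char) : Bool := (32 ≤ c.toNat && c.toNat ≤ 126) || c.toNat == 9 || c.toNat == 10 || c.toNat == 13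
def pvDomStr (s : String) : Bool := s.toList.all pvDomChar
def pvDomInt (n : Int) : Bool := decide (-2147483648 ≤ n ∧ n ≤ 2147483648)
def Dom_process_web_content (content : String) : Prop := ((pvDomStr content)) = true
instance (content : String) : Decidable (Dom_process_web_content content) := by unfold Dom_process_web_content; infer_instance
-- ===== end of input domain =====

-- B re-decomposes A's one-pass state machine as: filter lines, split into TITLE-led
-- segments, process each segment independently (objective: alternative decomposition).

-- ===== PORT A =====
-- A's loop body; capture_field is modelled as Option String starting at none — on inputs
-- where Python would read it unbound (an UnboundLocalError), Pre_ excludes the input.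
-- `entry["excerpt"] += …` is ported with getD: whenever capture is set, the key exists.
def pvStepA (st : List (PySem.Dict String String) × PySem.Dict String String × Option String)
    (rawLine : String) : List (PySem.Dict String String) × PySem.Dict String String × Option String :=
  if PySem.Str.strip rawLine = "" || PySem.Str.startswith (PySem.Str.strip rawLine) "-----" then st
  else if PySem.Str.startswith (PySem.Str.strip rawLine) "TITLE:" then
    ((if st.2.1.items ≠ [] then st.1 ++ [st.2.1] else st.1),
     PySem.Dict.insert PySem.Dict.empty "title"
       (PySem.Str.strip (PySem.Str.replace (PySem.Str.strip rawLine) "TITLE:" "")),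
     none)
  else if PySem.Str.startswith (PySem.Str.strip rawLine) "URL:" then
    (st.1, st.2.1.insert "url" (PySem.Str.strip (PySem.Str.replace (PySem.Str.strip rawLine) "URL:" "")), none)
  else if PySem.Str.startswith (PySem.Str.strip rawLine) "EXCERPT:" then
    (st.1, st.2.1.insert "excerpt" "", some "excerpt")
  else if PySem.Str.startswith (PySem.Str.strip rawLine) "CONTENT:" then
    (st.1, st.2.1.insert "content" "", some "content")
  else if st.2.2 = some "excerpt" then
    (st.1, st.2.1.insert "excerpt" (st.2.1.getD "excerpt" "" ++ PySem.Str.strip rawLine ++ "\n"), st.2.2)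
  else if st.2.2 = some "content" then
    (st.1, st.2.1.insert "content" (st.2.1.getD "content" "" ++ PySem.Str.strip rawLine ++ "\n"), st.2.2)
  else st

def process_web_content (content : String) : List (List (String × String)) :=
  (if ((PySem.Str.splitlines content).foldl pvStepA ([], PySem.Dict.empty, none)).2.1.items ≠ [] then
      ((PySem.Str.splitlines content).foldl pvStepA ([], PySem.Dict.empty, none)).1 ++
        [((PySem.Str.splitlines content).foldl pvStepA ([], PySem.Dict.empty, none)).2.1]
    else ((PySem.Str.splitlines content).foldl pvStepA ([], PySem.Dict.empty, none)).1).map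
    (fun d => d.items)

-- ===== PORT B =====
-- B's inner per-line update on (entry, capture); `entry[capture] + …` ported with getD
-- (the key always exists when capture is set).
def pvStepB (st : PySem.Dict String String × Option String) (s : String) :
    PySem.Dict String String × Option String :=
  if PySem.Str.startswith s "TITLE:" then
    (st.1.insert "title" (PySem.Str.strip (PySem.Str.replace s "TITLE:" "")), none)
  else if PySem.Str.startswith s "URL:" then
    (st.1.insert "url" (PySem.Str.strip (PySem.Str.replace s "URL:" "")), none)
  else if PySem.Str.startswith s "EXCERPT:" then
    (st.1.insert "excerpt" "", some "excerpt")
  else if PySem.Str.startswith s "CONTENT:" then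
    (st.1.insert "content" "", some "content")
  else if st.2 = some "excerpt" then
    (st.1.insert "excerpt" (st.1.getD "excerpt" "" ++ s ++ "\n"), st.2)
  else if st.2 = some "content" then
    (st.1.insert "content" (st.1.getD "content" "" ++ s ++ "\n"), st.2)
  else st

def pvKeptLines (content : String) : List String :=
  ((PySem.Str.splitlines content).map PySem.Str.strip).filter
    (fun s => decide (s ≠ "") && !PySem.Str.startswith s "-----")

def pvSegStep (p : List (List String) × List String) (s : String) :
    List (List String) × List String :=
  if PySem.Str.startswith s "TITLE:" then (p.1 ++ [p.2], [s]) else (p.1, p.2 ++ [s])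

def pvSegments (lines : List String) : List (List String) :=
  let p := lines.foldl pvSegStep ([], [])
  p.1 ++ [p.2]

def pvProcSeg (seg : List String) : PySem.Dict String String :=
  (seg.foldl pvStepB (PySem.Dict.empty, none)).1

def pvEmitStep (acc : List (PySem.Dict String String)) (seg : List String) :
    List (PySem.Dict String String) :=
  let e := pvProcSeg seg
  if e.items ≠ [] then acc ++ [e] else acc

-- Python B raises ValueError when the first kept line is not one of the four markers
-- (exactly the inputs Pre_ excludes); the port returns [] on that guard.
def process_web_content_alt (content : String) : List (List (String × String)) :=
  if decide (pvKeptLines content ≠ []) &&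
      !(PySem.Str.startswith ((pvKeptLines content).headD "") "TITLE:" ||
        PySem.Str.startswith ((pvKeptLines content).headD "") "URL:" ||
        PySem.Str.startswith ((pvKeptLines content).headD "") "EXCERPT:" ||
        PySem.Str.startswith ((pvKeptLines content).headD "") "CONTENT:") then []
  else ((pvSegments (pvKeptLines content)).foldl pvEmitStep []).map (fun d => d.items)

-- ===== PRECONDITION & SPEC =====
-- Pre_ excludes exactly the inputs where Python A raises UnboundLocalError (the else
-- branch reads capture_field before any assignment: the first kept line is not a
-- TITLE:/URL:/EXCERPT:/CONTENT: marker); B raises ValueError on the same inputs.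
def Pre_process_web_content (content : String) : Prop :=
  ∀ s ∈ (((PySem.Str.splitlines content).map PySem.Str.strip).filter
      (fun s => decide (s ≠ "") && !PySem.Str.startswith s "-----")).take 1,
    PySem.Str.startswith s "TITLE:" = true ∨ PySem.Str.startswith s "URL:" = true ∨
    PySem.Str.startswith s "EXCERPT:" = true ∨ PySem.Str.startswith s "CONTENT:" = true
instance (content : String) : Decidable (Pre_process_web_content content) := by
  unfold Pre_process_web_content; infer_instance

def pvWitness_process_web_content : String := "TITLE: t\nURL: u\nCONTENT:\nbody"

def Spec_process_web_content (content : String) (out : List (List (String × String))) : Prop :=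
  out = process_web_content_alt content
instance (content : String) (out : List (List (String × String))) : Decidable (Spec_process_web_content content out) := by unfold Spec_process_web_content; infer_instance

-- ===== CLAIM (what is proved, stated in full; the proofs are below) =====
def Claim_equal_process_web_content : Prop := ∀ (content : String), Dom_process_web_content content → Pre_process_web_content content → Spec_process_web_content content (process_web_content content)

-- ===== LEMMAS AND PROOFS =====

-- The common reference recursion: run B's per-line step from state (e, c), emitting the
-- current entry (if non-empty) at each TITLE line and at the end.
def pvRun (e : PySem.Dict String String) (c : Option String) :
    List String → List (PySem.Dict String String)
  | [] => if e.items ≠ [] then [e] else []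
  | s :: rest =>
      if PySem.Str.startswith s "TITLE:" then
        (if e.items ≠ [] then [e] else []) ++
          (let st := pvStepB (PySem.Dict.empty, none) s; pvRun st.1 st.2 rest)
      else
        let st := pvStepB (e, c) s
        pvRun st.1 st.2 rest

def pvSegsFrom (cur : List String) : List String → List (List String)
  | [] => [cur]
  | s :: rest =>
      if PySem.Str.startswith s "TITLE:" then cur :: pvSegsFrom [s] rest
      else pvSegsFrom (cur ++ [s]) rest

def pvEmits : List (List String) → List (PySem.Dict String String)
  | [] => []
  | seg :: rest =>
      (if (pvProcSeg seg).items ≠ [] then [pvProcSeg seg] else []) ++ pvEmits rest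

theorem pvSeg_foldl (lines : List String) :
    ∀ (segs : List (List String)) (cur : List String),
      (lines.foldl pvSegStep (segs, cur)).1 ++ [(lines.foldl pvSegStep (segs, cur)).2] =
        segs ++ pvSegsFrom cur lines := by
  induction lines with
  | nil => intro segs cur; simp [pvSegsFrom]
  | cons s rest ih =>
      intro segs cur
      simp only [List.foldl_cons, pvSegsFrom, pvSegStep]
      by_cases h : PySem.Str.startswith s "TITLE:" = true
      · simp only [if_pos h, ih, List.append_assoc, List.singleton_append]
      · simp only [if_neg h, ih]

theorem pvEmit_foldl (segs : List (List String)) :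
    ∀ (acc : List (PySem.Dict String String)),
      segs.foldl pvEmitStep acc = acc ++ pvEmits segs := by
  induction segs with
  | nil => intro acc; simp [pvEmits]
  | cons seg rest ih =>
      intro acc
      simp only [List.foldl_cons, pvEmits, ih]
      unfold pvEmitStep
      by_cases h : (pvProcSeg seg).items = []
      · simp [h]
      · simp [h]

theorem pvEmits_segsFrom (lines : List String) :
    ∀ (cur : List String),
      pvEmits (pvSegsFrom cur lines) =
        pvRun (cur.foldl pvStepB (PySem.Dict.empty, none)).1
              (cur.foldl pvStepB (PySem.Dict.empty, none)).2 lines := by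
  induction lines with
  | nil => intro cur; simp [pvSegsFrom, pvEmits, pvRun, pvProcSeg]
  | cons s rest ih =>
      intro cur
      by_cases h : PySem.Str.startswith s "TITLE:" = true
      · simp only [pvSegsFrom, if_pos h, pvEmits, pvRun]
        rw [ih [s]]
        simp [pvProcSeg]
      · simp only [pvSegsFrom, if_neg h, pvRun]
        rw [ih (cur ++ [s])]
        simp only [List.foldl_append, List.foldl_cons, List.foldl_nil]

-- A's per-kept-line step, written with B's entry-level step (proved equal to pvStepA below).
def pvCoreStep (st : List (PySem.Dict String String) × PySem.Dict String String × Option String)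
    (s : String) : List (PySem.Dict String String) × PySem.Dict String String × Option String :=
  if PySem.Str.startswith s "TITLE:" then
    ((if st.2.1.items ≠ [] then st.1 ++ [st.2.1] else st.1), pvStepB (PySem.Dict.empty, none) s)
  else (st.1, pvStepB (st.2.1, st.2.2) s)

-- A's fold over the raw lines equals a fold of the core step over the kept lines.
set_option maxHeartbeats 1000000 in
theorem pvA_filter (raw : List String) :
    ∀ (st : List (PySem.Dict String String) × PySem.Dict String String × Option String),
      raw.foldl pvStepA st =
        ((raw.map PySem.Str.strip).filter
          (fun s => decide (s ≠ "") && !PySem.Str.startswith s "-----")).foldl pvCoreStep st := by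
  induction raw with
  | nil => intro st; simp
  | cons r raw ih =>
      intro st
      simp only [List.map_cons, List.foldl_cons, List.filter_cons]
      by_cases hb : PySem.Str.strip r = "" ∨ PySem.Str.startswith (PySem.Str.strip r) "-----" = true
      · have hf : (decide (PySem.Str.strip r ≠ "") && !PySem.Str.startswith (PySem.Str.strip r) "-----") = false := by
          rcases hb with h | h
          · simp [h]
          · rw [h]; simp
        have hA : pvStepA st r = st := by
          unfold pvStepA
          rcases hb with h | h
          · rw [h]; simp
          · rw [h]; simp
        rw [hA, hf]
        simp only [Bool.false_eq_true, if_false]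
        exact ih st
      · rw [not_or] at hb
        have hx : PySem.Str.startswith (PySem.Str.strip r) "-----" = false := by
          cases hx2 : PySem.Str.startswith (PySem.Str.strip r) "-----" with
          | false => rfl
          | true => exact absurd hx2 hb.2
        have hf : (decide (PySem.Str.strip r ≠ "") && !PySem.Str.startswith (PySem.Str.strip r) "-----") = true := by
          rw [hx]
          simp only [Bool.not_false, Bool.and_true, decide_eq_true_eq]
          exact hb.1
        have hA : pvStepA st r = pvCoreStep st (PySem.Str.strip r) := by
          unfold pvStepA pvCoreStep pvStepB
          rw [if_neg (by rw [hx, decide_eq_false hb.1]; simp)]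
          split_ifs <;> rfl
        rw [hf, if_pos rfl]
        simp only [List.foldl_cons]
        rw [hA]
        exact ih _

theorem pvA_run (lines : List String) :
    ∀ (es : List (PySem.Dict String String)) (e : PySem.Dict String String) (c : Option String),
      (if (lines.foldl pvCoreStep (es, e, c)).2.1.items ≠ [] then
          (lines.foldl pvCoreStep (es, e, c)).1 ++ [(lines.foldl pvCoreStep (es, e, c)).2.1]
        else (lines.foldl pvCoreStep (es, e, c)).1) = es ++ pvRun e c lines := by
  induction lines with
  | nil => intro es e c; simp only [List.foldl_nil, pvRun]; split_ifs <;> simp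
  | cons s rest ih =>
      intro es e c
      simp only [List.foldl_cons, pvRun, pvCoreStep]
      by_cases h : PySem.Str.startswith s "TITLE:" = true
      · simp only [if_pos h]
        rw [ih]
        split_ifs <;> simp
      · simp only [if_neg h]
        rw [ih]

-- ===== VERDICT (by name: the statement is the Claim_ definition above) =====
theorem process_web_content_spec : Claim_equal_process_web_content := by
  intro content _ hpre
  unfold Spec_process_web_content process_web_content process_web_content_alt
  unfold Pre_process_web_content at hpre
  have hg : (decide (pvKeptLines content ≠ []) &&
      !(PySem.Str.startswith ((pvKeptLines content).headD "") "TITLE:" ||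
        PySem.Str.startswith ((pvKeptLines content).headD "") "URL:" ||
        PySem.Str.startswith ((pvKeptLines content).headD "") "EXCERPT:" ||
        PySem.Str.startswith ((pvKeptLines content).headD "") "CONTENT:")) = false := by
    unfold pvKeptLines
    cases hk : ((PySem.Str.splitlines content).map PySem.Str.strip).filter
        (fun s => decide (s ≠ "") && !PySem.Str.startswith s "-----") with
    | nil => simp
    | cons s t =>
        have hm := hpre s (by rw [hk]; simp)
        rcases hm with h | h | h | h <;> rw [List.headD_cons, h] <;> simp
  rw [hg]
  simp only [Bool.false_eq_true, if_false]
  rw [pvEmit_foldl]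
  unfold pvSegments
  rw [pvSeg_foldl]
  simp only [List.nil_append]
  rw [pvEmits_segsFrom]
  simp only [List.foldl_nil]
  unfold pvKeptLines
  rw [pvA_filter, pvA_run]
  simp
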